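-- pv_equiv track=rewrite | github.com/se-queda/EnergyBoundedNormLearnerMTSAD | src/tsb_metrics.py | get_list_anomaly
-- ===== SOURCE A (Python) =====
-- def get_list_anomaly(labels):
--     results = []
--     start = 0
--     anom = False
--     for i, val in enumerate(labels):
--         if val == 1:
--             anom = True
--         else:
--             if anom:
--                 results.append(i - start)
--                 anom = False
--         if not anom:
--             start = i
--     if anom:
--         results.append(len(labels) - start)
--     return results
-- ===== SOURCE B (Python) =====
-- from itertools import groupby
--
-- def get_list_anomaly(labels):
--     # each anomaly segment is measured from the last non-anomalous index
--     # (0 before any normal sample) to the segment's end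
--     results = []
--     pos = 0
--     last_normal = 0
--     for key, group in groupby(labels):
--         size = sum(1 for _ in group)
--         pos += size
--         if key == 1:
--             results.append(pos - last_normal)
--         else:
--             last_normal = pos - 1
--     return results
-- ===== Notes on version B (the rewrite author's own statement) =====
-- stated objective: idiomatic
-- what changed: Replaced A's per-element start/anom flag state machine with an itertools.groupby scan over maximal runs: for each run of 1s it emits the run's end position minus the last non-anomalous index, the same segment measure A computes element by element.
import Mathlib
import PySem

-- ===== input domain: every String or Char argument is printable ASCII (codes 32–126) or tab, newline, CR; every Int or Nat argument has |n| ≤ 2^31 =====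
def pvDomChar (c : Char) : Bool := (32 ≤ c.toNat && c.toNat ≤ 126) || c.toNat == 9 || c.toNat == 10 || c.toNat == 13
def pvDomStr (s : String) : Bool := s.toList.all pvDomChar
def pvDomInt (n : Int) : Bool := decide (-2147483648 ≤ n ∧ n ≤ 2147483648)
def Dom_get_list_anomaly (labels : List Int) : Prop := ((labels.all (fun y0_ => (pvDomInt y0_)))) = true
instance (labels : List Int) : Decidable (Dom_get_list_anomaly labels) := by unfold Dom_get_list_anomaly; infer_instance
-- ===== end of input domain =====

-- B replaces A's per-element start/anom flag state machine with an itertools.groupby scan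
-- over maximal runs, emitting the same segment measure per run of 1s (objective: idiomatic).

-- ===== PORT A =====
-- loop body of A: state = (results, start, anom), element = (i, val)
def pvStepA (st : List Int × Int × Bool) (p : Int × Int) : List Int × Int × Bool :=
  if p.2 = 1 then
    (st.1, st.2.1, true)
  else
    ((if st.2.2 then st.1 ++ [p.1 - st.2.1] else st.1), p.1, false)

def get_list_anomaly (labels : List Int) : List Int :=
  let st := (PySem.List.enumerate labels 0).foldl pvStepA ([], 0, false)
  if st.2.2 then st.1 ++ [(labels.length : Int) - st.2.1] else st.1

-- ===== PORT B =====
-- port of itertools.groupby's splitting of one run: (extra elements equal to v, rest)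
def pvTakeRun (v : Int) : List Int → Nat × List Int
  | [] => (0, [])
  | x :: xs => if x = v then let r := pvTakeRun v xs; (r.1 + 1, r.2) else (0, x :: xs)

theorem pvTakeRun_len (v : Int) : ∀ xs : List Int, (pvTakeRun v xs).2.length ≤ xs.length := by
  intro xs
  induction xs with
  | nil => simp [pvTakeRun]
  | cons x xs ih =>
    by_cases h : x = v
    · simp [pvTakeRun, h]; omega
    · simp [pvTakeRun, h]

-- B's groupby loop: state = (pos, last_normal), one maximal run per step
def pvAltGo : List Int → Int → Int → List Int
  | [], _, _ => []
  | v :: xs, pos, lastN =>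
    let r := pvTakeRun v xs
    let size : Int := (r.1 : Int) + 1
    if v = 1 then (pos + size - lastN) :: pvAltGo r.2 (pos + size) lastN
    else pvAltGo r.2 (pos + size) (pos + size - 1)
termination_by l _ _ => l.length
decreasing_by
  all_goals
    have := pvTakeRun_len v xs
    simp only [List.length_cons]
    omega

def get_list_anomaly_alt (labels : List Int) : List Int := pvAltGo labels 0 0

-- ===== PRECONDITION & SPEC =====
def Spec_get_list_anomaly (labels : List Int) (out : List Int) : Prop := out = get_list_anomaly_alt labels
instance (labels : List Int) (out : List Int) : Decidable (Spec_get_list_anomaly labels out) := by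
  unfold Spec_get_list_anomaly; infer_instance

-- ===== CLAIM (what is proved, stated in full; the proofs are below) =====
def Claim_equal_get_list_anomaly : Prop :=
  ∀ (labels : List Int), Dom_get_list_anomaly labels →
    Spec_get_list_anomaly labels (get_list_anomaly labels)

-- ===== LEMMAS AND PROOFS =====

-- reference recursion characterising A's loop on the remaining suffix
def pvGA : List Int → Int → Int → Bool → List Int
  | [], i, start, anom => if anom then [i - start] else []
  | v :: l, i, start, anom =>
    if v = 1 then pvGA l (i + 1) start true
    else (if anom then [i - start] else []) ++ pvGA l (i + 1) i false

-- A's fold (plus the final flush at index i + length) computes pvGA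
theorem pvA_fold (l : List Int) : ∀ (i start : Int) (anom : Bool) (res : List Int),
    (let st := (PySem.List.enumerate l i).foldl pvStepA (res, start, anom)
     if st.2.2 then st.1 ++ [(i + l.length) - st.2.1] else st.1) = res ++ pvGA l i start anom := by
  induction l with
  | nil => intro i start anom res; cases anom <;> simp [PySem.List.enumerate_nil, pvGA]
  | cons v l ih =>
    intro i start anom res
    rw [PySem.List.enumerate_cons, List.foldl_cons]
    by_cases hv : v = 1
    · subst hv
      have h := ih (i + 1) start true res
      simp only [pvStepA, pvGA, List.length_cons] at h ⊢
      simp only [reduceIte]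
      push_cast at h ⊢
      rw [show i + ((l.length : Int) + 1) = i + 1 + l.length by ring]
      exact h
    · have h := ih (i + 1) i false (if anom then res ++ [i - start] else res)
      simp only [pvStepA, if_neg hv, pvGA, List.length_cons] at h ⊢
      push_cast at h ⊢
      rw [show i + ((l.length : Int) + 1) = i + 1 + l.length by ring]
      rw [h]
      cases anom <;> simp

theorem pvAltGo_nil (pos lastN : Int) : pvAltGo [] pos lastN = [] := by rw [pvAltGo.eq_def]

-- peeling one element of a non-anomalous run off B's group-level recursion
theorem pvAltGo_peel (v : Int) (hv : v ≠ 1) : ∀ (xs : List Int) (pos lastN : Int),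
    pvAltGo (v :: xs) pos lastN = pvAltGo xs (pos + 1) pos := by
  intro xs pos lastN
  cases xs with
  | nil => rw [pvAltGo.eq_def]; simp [pvTakeRun, hv, pvAltGo_nil]
  | cons y ys =>
    by_cases hy : y = v
    · subst hy
      rw [pvAltGo, pvAltGo]
      simp only [pvTakeRun, if_neg hv, reduceIte]
      congr 1
      all_goals (push_cast; ring)
    · rw [pvAltGo]
      simp only [pvTakeRun, if_neg hy, if_neg hv]
      congr 1
      push_cast
      ring

-- main invariant: A's reference recursion equals B's group-level scan; the second
-- conjunct describes being inside a run of 1s whose remaining tail is l.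
theorem pvMain : ∀ (n : Nat) (l : List Int), l.length = n →
    (∀ pos start : Int, pvGA l pos start false = pvAltGo l pos start) ∧
    (∀ j start : Int,
      pvGA l j start true =
        (j + ((pvTakeRun 1 l).1 : Int) - start) ::
          pvAltGo (pvTakeRun 1 l).2 (j + ((pvTakeRun 1 l).1 : Int)) start) := by
  intro n
  induction n using Nat.strong_induction_on with
  | _ n ih =>
    intro l hl
    constructor
    · intro pos start
      cases l with
      | nil => simp [pvGA, pvAltGo_nil]
      | cons v l' =>
        by_cases hv : v = 1
        · subst hv
          rw [pvGA]
          simp only [reduceIte]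
          have h2 := (ih l'.length (by simp [← hl]) l' rfl).2 (pos + 1) start
          rw [h2, pvAltGo]
          simp only [reduceIte]
          congr 2
          all_goals ring_nf
        · rw [pvGA]
          simp only [if_neg hv, Bool.false_eq_true, reduceIte, List.nil_append]
          have h1 := (ih l'.length (by simp [← hl]) l' rfl).1 (pos + 1) pos
          rw [h1, pvAltGo_peel v hv]
    · intro j start
      cases l with
      | nil => simp [pvGA, pvTakeRun, pvAltGo_nil]
      | cons w l' =>
        by_cases hw : w = 1
        · subst hw
          rw [pvGA]
          simp only [reduceIte]
          have h2 := (ih l'.length (by simp [← hl]) l' rfl).2 (j + 1) start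
          rw [h2]
          simp only [pvTakeRun, reduceIte]
          congr 2
          all_goals (push_cast; ring_nf)
        · rw [pvGA]
          simp only [if_neg hw, reduceIte, List.singleton_append]
          have h1 := (ih l'.length (by simp [← hl]) l' rfl).1 (j + 1) j
          simp only [pvTakeRun, if_neg hw]
          rw [h1, pvAltGo_peel w hw]
          push_cast
          simp

-- ===== VERDICT (by name: the statement is the Claim_ definition above) =====
theorem get_list_anomaly_spec : Claim_equal_get_list_anomaly := by
  intro labels _
  unfold Spec_get_list_anomaly get_list_anomaly get_list_anomaly_alt
  have h := pvA_fold labels 0 0 false []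
  simp only [zero_add, List.nil_append] at h
  rw [h]
  exact (pvMain labels.length labels rfl).1 0 0
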